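-- pv_equiv track=rewrite | github.com/WhizHack-Tech/package_building_testing | frontend/grouping_epoch_time.py | group_time_by_30_minutes
-- ===== SOURCE A (Python) =====
-- def group_time_by_30_minutes(start_time, end_time):
--
--     # Calculate the total number of 30-minute intervals
--     total_intervals = (end_time - start_time) // (30 * 60 * 1000)
--
--     # Initialize the result list
--     result = []
--
--     # Generate start and end times for each 30-minute interval
--     for i in range(total_intervals):
--         interval_start = start_time + (i * 30 * 60 * 1000)
--         interval_end = interval_start + (30 * 60 * 1000)
--         result.append((interval_start, interval_end))
--
--     return result
-- ===== SOURCE B (Python) =====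
-- def group_time_by_30_minutes(start_time, end_time):
--     step = 30 * 60 * 1000
--
--     def build(lo, n):
--         # n consecutive 30-minute intervals starting at lo, by divide and conquer
--         if n <= 0:
--             return []
--         if n == 1:
--             return [(lo, lo + step)]
--         half = n // 2
--         return build(lo, half) + build(lo + half * step, n - half)
--
--     return build(start_time, (end_time - start_time) // step)
-- ===== Notes on version B (the rewrite author's own statement) =====
-- stated objective: alternative
-- what changed: A enumerates intervals with one counting loop; B computes the interval count and builds the list by divide and conquer, recursively splitting the count in half and concatenating the two halves.
import Mathlib
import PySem

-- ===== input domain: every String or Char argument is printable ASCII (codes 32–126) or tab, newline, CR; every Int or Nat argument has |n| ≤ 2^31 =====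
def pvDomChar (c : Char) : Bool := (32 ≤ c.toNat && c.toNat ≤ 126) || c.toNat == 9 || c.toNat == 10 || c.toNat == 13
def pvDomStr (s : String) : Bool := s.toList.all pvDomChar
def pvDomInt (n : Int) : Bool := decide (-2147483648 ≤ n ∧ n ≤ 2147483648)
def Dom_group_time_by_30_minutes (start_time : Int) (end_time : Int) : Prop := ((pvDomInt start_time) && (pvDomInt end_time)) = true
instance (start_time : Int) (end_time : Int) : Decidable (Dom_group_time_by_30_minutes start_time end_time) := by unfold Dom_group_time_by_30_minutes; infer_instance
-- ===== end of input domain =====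

-- B builds the interval list by divide and conquer on the interval count instead of A's counting loop (alternative decomposition, same cost).

-- ===== PORT A =====
-- counting loop: for each i, recompute interval_start and interval_end and append the pair
def group_time_by_30_minutes (start_time : Int) (end_time : Int) : List (Int × Int) :=
  let total_intervals := PySem.Int.floordiv (end_time - start_time) (30 * 60 * 1000)
  (PySem.List.pyRange 0 total_intervals 1).foldl
    (fun result i =>
      let interval_start := start_time + (i * 30 * 60 * 1000)
      let interval_end := interval_start + (30 * 60 * 1000)
      result ++ [(interval_start, interval_end)]) []

-- ===== PORT B =====
-- helper 'build' of Source B: n consecutive intervals from lo, splitting the count in half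
def gtbBuild (lo : Int) (n : Int) : List (Int × Int) :=
  if _h0 : n ≤ 0 then []
  else if _h1 : n = 1 then [(lo, lo + 30 * 60 * 1000)]
  else
    let half := PySem.Int.floordiv n 2
    gtbBuild lo half ++ gtbBuild (lo + half * (30 * 60 * 1000)) (n - half)
termination_by n.toNat
decreasing_by
  · have h2 : (2:Int) ≤ n := by omega
    have : PySem.Int.floordiv n 2 = n / 2 := PySem.Int.floordiv_eq_ediv_of_pos (by omega)
    simp only [this]; omega
  · have h2 : (2:Int) ≤ n := by omega
    have : PySem.Int.floordiv n 2 = n / 2 := PySem.Int.floordiv_eq_ediv_of_pos (by omega)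
    simp only [this]; omega

def group_time_by_30_minutes_alt (start_time : Int) (end_time : Int) : List (Int × Int) :=
  gtbBuild start_time (PySem.Int.floordiv (end_time - start_time) (30 * 60 * 1000))

-- ===== PRECONDITION & SPEC =====
def Spec_group_time_by_30_minutes (start_time : Int) (end_time : Int) (out : List (Int × Int)) : Prop := out = group_time_by_30_minutes_alt start_time end_time
instance (start_time : Int) (end_time : Int) (out : List (Int × Int)) : Decidable (Spec_group_time_by_30_minutes start_time end_time out) := by unfold Spec_group_time_by_30_minutes; infer_instance

-- ===== CLAIM (what is proved, stated in full; the proofs are below) =====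
def Claim_equal_group_time_by_30_minutes : Prop := ∀ (start_time : Int) (end_time : Int), Dom_group_time_by_30_minutes start_time end_time → Spec_group_time_by_30_minutes start_time end_time (group_time_by_30_minutes start_time end_time)

-- ===== LEMMAS AND PROOFS =====

-- A's append-loop is the map over the same range
theorem pvFoldlAppend (l : List Int) (g : Int → Int × Int) (acc : List (Int × Int)) :
    l.foldl (fun r i => r ++ [g i]) acc = acc ++ l.map g := by
  induction l generalizing acc with
  | nil => simp
  | cons x xs ih => simp [ih, List.append_assoc]

-- the divide-and-conquer builder produces exactly the adjacent-interval table
theorem pvBuildEq (m : ℕ) (lo : Int) :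
    gtbBuild lo (m : Int)
      = (List.range m).map (fun k : ℕ => ((lo + (k : Int) * (30 * 60 * 1000) : Int),
          (lo + (k : Int) * (30 * 60 * 1000) + 30 * 60 * 1000 : Int))) := by
  induction m using Nat.strong_induction_on generalizing lo with
  | _ m ih =>
    match m with
    | 0 => rw [gtbBuild]; simp
    | 1 => rw [gtbBuild]; norm_num
    | (m + 2) =>
      rw [gtbBuild]
      have hm2 : ¬ ((m : Int) + 2 ≤ 0) := by omega
      have hm1 : ¬ ((m : Int) + 2 = 1) := by omega
      have hc : ((m + 2 : ℕ) : Int) = (m : Int) + 2 := by push_cast; ring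
      rw [dif_neg (by omega : ¬ (((m+2:ℕ):Int) ≤ 0)), dif_neg (by omega : ¬ (((m+2:ℕ):Int) = 1))]
      have hfd : PySem.Int.floordiv ((m+2:ℕ) : Int) 2 = (((m+2)/2 : ℕ) : Int) :=
        PySem.Int.floordiv_natCast (m+2) 2
      set h : ℕ := (m+2)/2 with hh
      have hpos : 1 ≤ h := by omega
      have hlt : h < m + 2 := by omega
      have hsub : ((m+2:ℕ) : Int) - (h : Int) = ((m + 2 - h : ℕ) : Int) := by push_cast; omega
      simp only [hfd, hsub]
      rw [ih h hlt, ih (m + 2 - h) (by omega)]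
      have hsplit : m + 2 = h + (m + 2 - h) := by omega
      rw [hsplit, List.range_add, List.map_append, List.map_map]
      congr 1
      have hcc : h + (m + 2 - h) - h = m + 2 - h := by omega
      rw [hcc]
      apply List.map_congr_left
      intro k _
      simp only [Function.comp, Prod.mk.injEq]
      constructor <;> (push_cast; ring)

theorem group_time_spec_aux (s e : Int) :
    group_time_by_30_minutes s e = group_time_by_30_minutes_alt s e := by
  simp only [group_time_by_30_minutes, group_time_by_30_minutes_alt]
  generalize PySem.Int.floordiv (e - s) (30 * 60 * 1000) = n
  rw [pvFoldlAppend, PySem.List.pyRange_one]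
  simp only [List.nil_append, sub_zero, List.map_map]
  by_cases hn : 0 ≤ n
  · have : n = ((n.toNat : ℕ) : Int) := by omega
    rw [this, pvBuildEq]
    simp only [Int.toNat_natCast]
    apply List.map_congr_left
    intro k _
    simp only [Function.comp, Prod.mk.injEq]
    constructor <;> ring
  · have h0 : n.toNat = 0 := by omega
    rw [gtbBuild]
    simp [h0, dif_pos (by omega : n ≤ 0)]

-- ===== VERDICT (by name: the statement is the Claim_ definition above) =====
theorem group_time_by_30_minutes_spec : Claim_equal_group_time_by_30_minutes := by
  intro s e _
  unfold Spec_group_time_by_30_minutes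
  exact group_time_spec_aux s e
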